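-- pv_equiv track=rewrite | github.com/kimgyuhee/Python | Chapter0_Algorithm/2304/230423/test01.py | solution
-- ===== SOURCE A (Python) =====
-- def solution(n, m, section):
--     answer = 1
--     painting = section[-1]-m+1
--     while painting > section[0] :
--         painting -=m+1
--         answer +=1
--     if m == 1 :
--         answer +=1
--     return answer
-- ===== SOURCE B (Python) =====
-- def solution(n, m, section):
--     first = section[0]
--     diff = section[-1] - m + 1 - first
--     steps = -((-diff) // (m + 1)) if diff > 0 else 0
--     return 1 + steps + (1 if m == 1 else 0)
-- ===== Notes on version B (the rewrite author's own statement) =====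
-- stated objective: alternative
-- what changed: Replaces A's repeated-subtraction while loop by a closed-form ceiling division that counts the loop's iterations directly.
import Mathlib
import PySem

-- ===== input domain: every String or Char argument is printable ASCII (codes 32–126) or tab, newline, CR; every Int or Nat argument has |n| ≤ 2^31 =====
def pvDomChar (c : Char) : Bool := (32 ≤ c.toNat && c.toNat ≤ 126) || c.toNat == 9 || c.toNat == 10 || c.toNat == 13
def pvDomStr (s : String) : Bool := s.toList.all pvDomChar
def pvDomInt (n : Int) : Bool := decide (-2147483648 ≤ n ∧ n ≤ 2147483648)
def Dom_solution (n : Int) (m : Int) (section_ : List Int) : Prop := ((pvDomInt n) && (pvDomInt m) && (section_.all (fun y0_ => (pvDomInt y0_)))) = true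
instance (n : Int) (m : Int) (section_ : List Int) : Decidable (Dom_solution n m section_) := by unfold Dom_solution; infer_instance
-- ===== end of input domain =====

-- B replaces A's repeated-subtraction while loop by one closed-form ceiling division (alternative: no loop).

-- ===== PORT A =====
-- A's while loop; the '0 < m + 1' conjunct is only a totality guard: with m + 1 ≤ 0 the
-- Python loop never terminates, and such inputs are excluded by Pre_solution.
def aWhileLoop (first m painting answer : Int) : Int :=
  if _h : first < painting ∧ 0 < m + 1 then
    aWhileLoop first m (painting - (m + 1)) (answer + 1)
  else answer
termination_by (painting - first).toNat
decreasing_by omega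

def solution (n : Int) (m : Int) (section_ : List Int) : Int :=
  match PySem.List.pyGet? section_ (-1), PySem.List.pyGet? section_ 0 with
  | some last, some first =>
      let painting := last - m + 1
      let answer := aWhileLoop first m painting 1
      if m == 1 then answer + 1 else answer
  | _, _ => 0  -- IndexError on empty list; excluded by Pre_solution

-- ===== PORT B =====
def solution_alt (n : Int) (m : Int) (section_ : List Int) : Int :=
  match PySem.List.pyGet? section_ 0 with
  | none => 0  -- IndexError on empty list; excluded by Pre_solution
  | some first =>
    match PySem.List.pyGet? section_ (-1) with
    | none => 0
    | some last =>
        let diff := last - m + 1 - first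
        let steps := if 0 < diff then -(PySem.Int.floordiv (-diff) (m + 1)) else 0
        1 + steps + (if m == 1 then 1 else 0)

-- ===== PRECONDITION & SPEC =====
-- Pre_ excludes exactly the inputs on which A does not return: the empty list (IndexError)
-- and m ≤ -1 together with a loop condition that initially holds (the decrement by m+1 then
-- never lowers 'painting' below section[0], so A loops forever).
def Pre_solution (n : Int) (m : Int) (section_ : List Int) : Prop :=
  section_ ≠ [] ∧ (0 ≤ m ∨ section_.getLastD 0 - m + 1 ≤ section_.headD 0)
instance (n : Int) (m : Int) (section_ : List Int) : Decidable (Pre_solution n m section_) := by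
  unfold Pre_solution; infer_instance

def pvWitness_solution : Int × Int × List Int := (4, 2, [1, 4, 6])

def Spec_solution (n : Int) (m : Int) (section_ : List Int) (out : Int) : Prop := out = solution_alt n m section_
instance (n : Int) (m : Int) (section_ : List Int) (out : Int) : Decidable (Spec_solution n m section_ out) := by unfold Spec_solution; infer_instance

-- ===== CLAIM (what is proved, stated in full; the proofs are below) =====
def Claim_equal_solution : Prop := ∀ (n : Int) (m : Int) (section_ : List Int), Dom_solution n m section_ → Pre_solution n m section_ → Spec_solution n m section_ (solution n m section_)

-- ===== LEMMAS AND PROOFS =====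

-- The loop computes the ceiling of (painting - first) / (m+1) when it runs at all.
theorem aWhileLoop_closed (first m : Int) (hm : 0 < m + 1) :
    ∀ (p a : Int), aWhileLoop first m p a
      = a + (if 0 < p - first then -(PySem.Int.floordiv (-(p - first)) (m + 1)) else 0) := by
  intro p a
  induction p, a using aWhileLoop.induct first m with
  | case1 p a h ih =>
      rw [aWhileLoop, dif_pos h, ih]
      by_cases h2 : 0 < p - (m + 1) - first
      · rw [if_pos h2, if_pos (by omega)]
        set q := -(PySem.Int.floordiv (-(p - (m + 1) - first)) (m + 1)) with hq
        have hb := (PySem.Int.neg_floordiv_neg_eq_iff_of_pos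
          (a := p - (m + 1) - first) (b := m + 1) (q := q) hm).mp hq.symm
        have : -(PySem.Int.floordiv (-(p - first)) (m + 1)) = q + 1 := by
          refine (PySem.Int.neg_floordiv_neg_eq_iff_of_pos hm).mpr ⟨?_, ?_⟩
          · have e : (q + 1 - 1) * (m + 1) = (q - 1) * (m + 1) + (m + 1) := by ring
            rw [e]; omega
          · have e : (q + 1) * (m + 1) = q * (m + 1) + (m + 1) := by ring
            rw [e]; omega
        rw [this]; ring
      · rw [if_neg h2, if_pos (by omega)]
        have : -(PySem.Int.floordiv (-(p - first)) (m + 1)) = 1 := by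
          refine (PySem.Int.neg_floordiv_neg_eq_iff_of_pos hm).mpr ⟨by omega, by omega⟩
        rw [this]; ring
  | case2 p a h =>
      rw [aWhileLoop, dif_neg h]
      rcases lt_or_ge first p with hp | hp
      · -- loop guard failed only because m + 1 ≤ 0; but then hm contradicts h
        exact absurd ⟨hp, hm⟩ h
      · rw [if_neg (by omega)]; ring

theorem solution_eq_alt : ∀ (n m : Int) (section_ : List Int),
    Pre_solution n m section_ → solution n m section_ = solution_alt n m section_ := by
  intro n m section_ ⟨hne, hterm⟩
  obtain ⟨x, xs, rfl⟩ := List.exists_cons_of_ne_nil hne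
  have hlast : PySem.List.pyGet? (x :: xs) (-1) = some ((x :: xs).getLast (by simp)) := by
    rw [PySem.List.pyGet?_neg_one, List.getLast?_eq_getLast_of_ne_nil (by simp)]
  have hfirst : PySem.List.pyGet? (x :: xs) (0 : Int) = some x := PySem.List.pyGet?_zero_cons x xs
  set L := (x :: xs).getLast (by simp) with hL
  have hLD : (x :: xs).getLastD 0 = L := by
    rw [hL, List.getLastD_eq_getLast?, List.getLast?_eq_getLast_of_ne_nil (by simp)]
    rfl
  simp only [solution, solution_alt, hlast, hfirst]
  rcases le_or_gt 0 m with hm | hm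
  · -- loop runs; closed form applies
    rw [aWhileLoop_closed x m (by omega) (L - m + 1) 1]
    by_cases hd : 0 < L - m + 1 - x
    · simp only [if_pos hd]
      by_cases h1 : m = 1 <;> simp [h1] <;> ring
    · simp only [if_neg hd]
      by_cases h1 : m = 1 <;> simp [h1] <;> ring
  · -- m ≤ -1: Pre_ forces the guard to be initially false; both sides are 1
    have hd : L - m + 1 ≤ x := by
      rcases hterm with h | h
      · omega
      · rw [hLD] at h; simpa using h
    rw [aWhileLoop, dif_neg (show ¬(x < L - m + 1 ∧ 0 < m + 1) by omega)]
    rw [if_neg (show ¬ 0 < L - m + 1 - x by omega)]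
    have : (m == 1) = false := by simp; omega
    simp [this]

-- ===== VERDICT (by name: the statement is the Claim_ definition above) =====
theorem solution_spec : Claim_equal_solution := by
  intro n m section_ _ hpre
  exact solution_eq_alt n m section_ hpre
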